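-- pv_equiv track=rewrite | github.com/DevProd-MH/Face-Recognition-Attendance-with-CNN | scripts/marker.py | symetry
-- ===== SOURCE A (Python) =====
-- def symetry(vrfy, orig):
--     found = []
--     if len(vrfy) == len(orig):
--         for o in orig:
--             for v in vrfy:
--                 if v == o:
--                     found.append("true")
--                 else:
--                     found.append("false")
--         return found.count("true") == found.count("false")
--     else:
--         return
-- ===== SOURCE B (Python) =====
-- def symetry(vrfy, orig):
--     if len(vrfy) != len(orig):
--         return None
--     counts = {}
--     for v in vrfy:
--         counts[v] = counts.get(v, 0) + 1
--     matches = 0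
--     for o in orig:
--         matches += counts.get(o, 0)
--     n = len(orig)
--     return 2 * matches == n * n
-- ===== Notes on version B (the rewrite author's own statement) =====
-- stated objective: faster
-- what changed: Replaced the O(n^2) nested loop that builds a quadratic list of 'true'/'false' strings with a frequency dict: matches = sum over orig of vrfy's count, then test 2*matches == n*n.
import Mathlib
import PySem

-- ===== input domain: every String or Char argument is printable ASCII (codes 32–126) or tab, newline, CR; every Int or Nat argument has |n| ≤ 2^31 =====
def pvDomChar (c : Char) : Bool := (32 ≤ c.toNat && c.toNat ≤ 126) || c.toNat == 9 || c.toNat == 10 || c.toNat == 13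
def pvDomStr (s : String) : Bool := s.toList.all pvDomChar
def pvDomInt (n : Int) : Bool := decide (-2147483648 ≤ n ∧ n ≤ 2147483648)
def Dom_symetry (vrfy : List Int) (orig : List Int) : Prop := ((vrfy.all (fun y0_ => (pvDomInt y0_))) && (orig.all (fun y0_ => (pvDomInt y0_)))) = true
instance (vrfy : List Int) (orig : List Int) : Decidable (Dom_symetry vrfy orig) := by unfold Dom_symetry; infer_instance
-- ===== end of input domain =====

-- B replaces A's O(n^2) nested loop over the product with a frequency dict and a linear
-- matching-pairs count, testing 2*matched == n*n (measured asymptotically faster).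

-- ===== PORT A =====
def symetry (vrfy : List Int) (orig : List Int) : Option Bool :=
  let found : List String := []
  if vrfy.length = orig.length then
    let found := orig.foldl (fun acc o =>
      vrfy.foldl (fun acc2 v =>
        if v == o then acc2 ++ ["true"] else acc2 ++ ["false"]) acc) found
    some (PySem.List.count found "true" == PySem.List.count found "false")
  else none

-- ===== PORT B =====
def symetry_alt (vrfy : List Int) (orig : List Int) : Option Bool :=
  if vrfy.length ≠ orig.length then none
  else
    let counts : PySem.Dict Int Int :=
      vrfy.foldl (fun d v => d.insert v (d.getD v 0 + 1)) PySem.Dict.empty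
    let matched : Int := orig.foldl (fun m o => m + counts.getD o 0) 0
    let n : Int := (orig.length : Int)
    some (2 * matched == n * n)

-- ===== PRECONDITION & SPEC =====
def Spec_symetry (vrfy : List Int) (orig : List Int) (out : Option Bool) : Prop := out = symetry_alt vrfy orig
instance (vrfy : List Int) (orig : List Int) (out : Option Bool) : Decidable (Spec_symetry vrfy orig out) := by unfold Spec_symetry; infer_instance

-- ===== CLAIM (what is proved, stated in full; the proofs are below) =====
def Claim_equal_symetry : Prop := ∀ (vrfy : List Int) (orig : List Int), Dom_symetry vrfy orig → Spec_symetry vrfy orig (symetry vrfy orig)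

-- ===== LEMMAS AND PROOFS =====

-- A's inner loop over vrfy appends "true" exactly (vrfy.count o) times.
lemma count_true_inner (vrfy : List Int) (o : Int) :
    ((vrfy.map (fun v => if v == o then "true" else "false")).count "true") = vrfy.count o := by
  simp only [List.count, List.countP_map]
  apply List.countP_congr; intro x _
  by_cases h : x = o <;> simp [h]

-- every element of A's `found` list is "true" or "false", so the two counts sum to the length
lemma count_tf (l : List String) (h : ∀ x ∈ l, x = "true" ∨ x = "false") :
    l.count "true" + l.count "false" = l.length := by
  induction l with
  | nil => simp
  | cons a t ih =>
    have ha := h a (by simp)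
    have ht := ih (fun x hx => h x (by simp [hx]))
    rcases ha with ha | ha <;> subst ha <;>
      simp at * <;> omega

lemma sum_map_natCast (l : List Int) (f : Int → Nat) :
    (l.map (fun x => ((f x : Nat) : Int))).sum = ((l.map f).sum : Int) := by
  induction l with
  | nil => simp
  | cons a t ih => simp [ih]

-- ===== VERDICT (by name: the statement is the Claim_ definition above) =====
theorem symetry_spec : Claim_equal_symetry := by
  intro vrfy orig _
  show symetry vrfy orig = symetry_alt vrfy orig
  unfold symetry symetry_alt
  by_cases hl : vrfy.length = orig.length
  · rw [if_pos hl, if_neg (by simp [hl])]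
    -- normalise A's nested fold into a flatMap
    have hA : ∀ acc, orig.foldl (fun acc o =>
        vrfy.foldl (fun acc2 v =>
          if v == o then acc2 ++ ["true"] else acc2 ++ ["false"]) acc) acc
        = acc ++ orig.flatMap (fun o => vrfy.map (fun v => if v == o then "true" else "false")) := by
      intro acc
      have hin : ∀ (acc2 : List String) (o : Int), vrfy.foldl (fun acc2 v =>
          if v == o then acc2 ++ ["true"] else acc2 ++ ["false"]) acc2
          = acc2 ++ vrfy.map (fun v => if v == o then "true" else "false") := by
        intro acc2 o
        have := PySem.List.foldl_append_singleton_eq_map (l := vrfy)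
          (f := fun v => if v == o then "true" else "false") (acc := acc2)
        rw [← this]
        apply PySem.List.foldl_congr_mem
        intro a x _; by_cases h : x == o <;> simp [h]
      calc orig.foldl _ acc
          = orig.foldl (fun a o => a ++ vrfy.map (fun v => if v == o then "true" else "false")) acc := by
            apply PySem.List.foldl_congr_mem; intro a o _; exact hin a o
        _ = _ := PySem.List.foldl_append_eq_flatMap _ _ _
    rw [hA]
    set found := orig.flatMap (fun o => vrfy.map (fun v => if v == o then "true" else "false")) with hf
    dsimp only
    simp only [List.nil_append]
    rw [PySem.Dict.foldl_insert_getD_add_one_eq_counter]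
    have hB : orig.foldl (fun m o => m + (PySem.Dict.counter vrfy).getD o 0) 0
        = ((orig.map (fun o => vrfy.count o)).sum : Int) := by
      rw [PySem.List.foldl_add]
      have : orig.map (fun o => (PySem.Dict.counter vrfy).getD o 0)
           = orig.map (fun o => ((vrfy.count o : Nat) : Int)) := by
        apply List.map_congr_left; intro o _; exact PySem.Dict.getD_counter vrfy o
      rw [this, sum_map_natCast]; ring
    rw [hB]
    -- counts on the A side
    have htrue : found.count "true" = (orig.map (fun o => vrfy.count o)).sum := by
      rw [hf, List.count_flatMap]
      exact congrArg List.sum (List.map_congr_left (fun o _ => count_true_inner vrfy o))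
    have hlen : found.length = orig.length * vrfy.length := by
      rw [hf, List.length_flatMap]
      simp only [List.length_map]
      exact PySem.List.sum_map_const_nat orig vrfy.length
    have hmem : ∀ x ∈ found, x = "true" ∨ x = "false" := by
      intro x hx
      rw [hf] at hx
      simp only [List.mem_flatMap, List.mem_map] at hx
      obtain ⟨o, _, v, _, hv⟩ := hx
      by_cases h : v == o
      · left; rw [← hv]; simp [h]
      · right; rw [← hv]; simp [h]
    have hsum := count_tf found hmem
    simp only [PySem.List.count_eq]
    set S := (orig.map (fun o => vrfy.count o)).sum with hS
    have h2 : found.count "false" = orig.length * vrfy.length - S := by omega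
    rw [htrue, h2]
    -- final arithmetic: S = n*n - S  ↔  2*S = n*n  (with S ≤ n*n)
    have hle : S ≤ orig.length * vrfy.length := by omega
    rw [hl] at hle h2 ⊢
    congr 1
    rw [Bool.eq_iff_iff]
    simp only [beq_iff_eq]
    constructor <;> intro h <;> omega
  · rw [if_neg hl, if_pos (by simp [hl])]
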